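-- pv_equiv track=rewrite | github.com/PingPingE/Algorithm | Codility/MaxCounters.py | solution
-- ===== SOURCE A (Python) =====
-- def solution(N, A):
--     # Implement your solution here
--     counter = [0] * N
--     check_max = 0  # 저장한 max값
--     cur_max = 0  # 현재 max 값
--     for a in A:
--         if a <= N:
--             counter[a - 1] = max(counter[a - 1], check_max) + 1
--             cur_max = max(cur_max, counter[a - 1])
--         else:
--             check_max = cur_max
--     return [c if c >= check_max else check_max for c in counter]
-- ===== SOURCE B (Python) =====
-- def solution(N, A):
--     # Eager stateless simulation: no running maxima are maintained; each
--     # max-counter op recomputes max(counter) and overwrites the whole array,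
--     # which is returned as-is with no final pass.
--     counter = [0] * N
--     for a in A:
--         if a <= N:
--             counter[a - 1] += 1
--         else:
--             m = max(counter) if counter else 0
--             counter = [m] * N
--     return counter
-- ===== Notes on version B (the rewrite author's own statement) =====
-- stated objective: alternative
-- what changed: Replaces the lazy deferred-max strategy (stored floor check_max applied on access and in a final comprehension) with an eager stateless simulation that keeps no running maxima, recomputes max(counter) on each max-counter op, overwrites the whole array with it, and returns the array directly.
import Mathlib
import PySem

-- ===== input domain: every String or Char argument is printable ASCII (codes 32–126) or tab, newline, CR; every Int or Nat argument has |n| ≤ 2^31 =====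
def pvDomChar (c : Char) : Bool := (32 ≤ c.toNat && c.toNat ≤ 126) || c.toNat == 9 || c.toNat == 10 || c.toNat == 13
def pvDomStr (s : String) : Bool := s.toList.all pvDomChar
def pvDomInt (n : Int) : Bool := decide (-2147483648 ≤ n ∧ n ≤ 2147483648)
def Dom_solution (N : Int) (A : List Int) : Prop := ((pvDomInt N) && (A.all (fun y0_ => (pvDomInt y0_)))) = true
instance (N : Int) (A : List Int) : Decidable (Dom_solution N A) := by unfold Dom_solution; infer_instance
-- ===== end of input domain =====

-- B replaces A's lazy deferred-max bookkeeping (floor check_max applied on access and in a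
-- final comprehension) with an eager stateless simulation that keeps no running maxima,
-- recomputes max(counter) at each max-op and overwrites the whole array; not faster.

-- ===== PORT A =====
-- state: (counter, check_max, cur_max)
def solStepA (N : Int) (s : List Int × Int × Int) (a : Int) : List Int × Int × Int :=
  if a ≤ N then
    let v := max (PySem.List.pyGetD s.1 (a - 1) 0) s.2.1 + 1
    (PySem.List.pySetD s.1 (a - 1) v, s.2.1, max s.2.2 v)
  else
    (s.1, s.2.2, s.2.2)

def solution (N : Int) (A : List Int) : List Int :=
  let s := A.foldl (solStepA N) (List.replicate N.toNat 0, 0, 0)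
  s.1.map (fun c => if c ≥ s.2.1 then c else s.2.1)

-- ===== PORT B =====
-- max(counter) if counter else 0   (Python's max over a nonempty list is a left fold)
def pyMax0 : List Int → Int
  | [] => 0
  | x :: xs => xs.foldl max x

def runEager (N : Int) : List Int → List Int → List Int
  | counter, [] => counter
  | counter, a :: rest =>
    if a ≤ N then
      runEager N (PySem.List.pySetD counter (a - 1) (PySem.List.pyGetD counter (a - 1) 0 + 1)) rest
    else
      runEager N (List.replicate N.toNat (pyMax0 counter)) rest

def solution_alt (N : Int) (A : List Int) : List Int :=
  runEager N (List.replicate N.toNat 0) A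

-- ===== PRECONDITION & SPEC =====
-- Pre_ excludes exactly the inputs on which A raises IndexError: some a with a ≤ N and a < 1 - N
-- (counter[a-1] out of range even after Python's negative-index rule).
def Pre_solution (N : Int) (A : List Int) : Prop := ∀ a ∈ A, N < a ∨ 1 - N ≤ a
instance (N : Int) (A : List Int) : Decidable (Pre_solution N A) := by unfold Pre_solution; infer_instance

def pvWitness_solution : Int × List Int := (3, [1, 4, 2, 3, 1])

def Spec_solution (N : Int) (A : List Int) (out : List Int) : Prop := out = solution_alt N A
instance (N : Int) (A : List Int) (out : List Int) : Decidable (Spec_solution N A out) := by unfold Spec_solution; infer_instance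

-- ===== CLAIM (what is proved, stated in full; the proofs are below) =====
def Claim_equal_solution : Prop := ∀ (N : Int) (A : List Int), Dom_solution N A → Pre_solution N A → Spec_solution N A (solution N A)

-- ===== LEMMAS AND PROOFS =====

lemma pyIdx_some (n : Nat) (i : Int) (h1 : -(n : Int) ≤ i) (h2 : i < n) :
    ∃ k, PySem.List.pyIdx? n i = some k ∧ k < n := by
  unfold PySem.List.pyIdx?
  by_cases h : 0 ≤ i
  · exact ⟨i.toNat, by simp [h, h2], by omega⟩
  · exact ⟨n - (-i).toNat, by simp [h, h1], by omega⟩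

lemma pyGetD_of_idx {xs : List Int} {i : Int} {k : Nat} (d : Int)
    (h : PySem.List.pyIdx? xs.length i = some k) (hk : k < xs.length) :
    PySem.List.pyGetD xs i d = xs[k] := by
  simp [PySem.List.pyGetD, PySem.List.pyGet?, h, List.getElem?_eq_getElem hk]

lemma pySetD_of_idx {xs : List Int} {i : Int} {k : Nat} (v : Int)
    (h : PySem.List.pyIdx? xs.length i = some k) :
    PySem.List.pySetD xs i v = xs.set k v := by
  simp [PySem.List.pySetD, PySem.List.pySet?, h]

-- facts about foldr max 0 (the proof's normal form for max-of-list)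
lemma foldr_max_set : ∀ (l : List Int) (k : Nat) (v : Int), k < l.length → l[k]! ≤ v →
    (l.set k v).foldr max 0 = max (l.foldr max 0) v := by
  intro l
  induction l with
  | nil => intro k v h _; simp at h
  | cons x xs ih =>
    intro k v hk hv
    cases k with
    | zero =>
      simp only [List.getElem!_eq_getElem?_getD, List.getElem?_cons_zero, Option.getD_some] at hv
      simp only [List.set_cons_zero, List.foldr_cons]
      omega
    | succ k =>
      simp only [List.getElem!_eq_getElem?_getD, List.getElem?_cons_succ] at hv
      simp only [List.set_cons_succ, List.foldr_cons]
      rw [ih k v (by simpa using hk) (by simpa using hv)]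
      omega

lemma foldr_max_all_eq : ∀ (l : List Int) (v : Int), l ≠ [] → (∀ x ∈ l, x = v) → 0 ≤ v →
    l.foldr max 0 = v := by
  intro l
  induction l with
  | nil => intro v h; simp at h
  | cons x xs ih =>
    intro v _ hall hv
    have hx : x = v := hall x (by simp)
    cases xs with
    | nil => subst hx; simp only [List.foldr_cons, List.foldr_nil]; omega
    | cons y ys =>
      simp only [List.foldr_cons] at *
      rw [ih v (by simp) (fun z hz => hall z (by simp [hz])) hv, hx]
      omega

lemma foldr_max_pull : ∀ (xs : List Int) (x a : Int), xs.foldr max (max x a) = max a (xs.foldr max x) := by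
  intro xs
  induction xs with
  | nil => intro x a; simp [max_comm]
  | cons b xs ih =>
    intro x a
    simp only [List.foldr_cons, ih]
    omega

lemma foldl_max_eq_foldr : ∀ (xs : List Int) (x : Int), xs.foldl max x = xs.foldr max x := by
  intro xs
  induction xs with
  | nil => intro x; rfl
  | cons a xs ih =>
    intro x
    simp only [List.foldl_cons, List.foldr_cons, ih, foldr_max_pull]

lemma pyMax0_eq_foldr (l : List Int) (h : ∀ y ∈ l, 0 ≤ y) : pyMax0 l = l.foldr max 0 := by
  cases l with
  | nil => rfl
  | cons x xs =>
    have hx : max 0 x = x := by have := h x (by simp); omega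
    rw [show pyMax0 (x :: xs) = xs.foldl max x from rfl, foldl_max_eq_foldr,
        List.foldr_cons, ← foldr_max_pull, hx]

-- The loop invariant: B's array is A's counter with the stored floor check_max applied,
-- its max (what B recomputes at a max-op) equals A's cur_max, and A's counters are
-- nonnegative and bounded by cur_max.
lemma solution_loop_inv (N : Int) (A : List Int) :
    ∀ (cA : List Int) (chk cm : Int),
      0 ≤ chk → chk ≤ cm →
      (∀ c ∈ cA, 0 ≤ c ∧ c ≤ cm) → cA.length = N.toNat →
      (cA = [] ∨ (cA.map (fun c => max c chk)).foldr max 0 = cm) →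
      (∀ a ∈ A, N < a ∨ 1 - N ≤ a) →
      runEager N (cA.map (fun c => max c chk)) A
        = (A.foldl (solStepA N) (cA, chk, cm)).1.map
            (fun c => max c (A.foldl (solStepA N) (cA, chk, cm)).2.1) := by
  induction A with
  | nil => intro cA chk cm _ _ _ _ _ _; rfl
  | cons a rest ih =>
    intro cA chk cm h0 h1 h2 h3 hM hPre
    simp only [List.foldl_cons]
    by_cases ha : a ≤ N
    · -- increment branch; the index a-1 is in range
      have hN : 1 - N ≤ a := by rcases hPre a (by simp) with h | h <;> omega
      have hN1 : 1 ≤ N := by omega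
      obtain ⟨k, hk, hklt⟩ := pyIdx_some cA.length (a - 1) (by omega) (by omega)
      have hkB : PySem.List.pyIdx? (cA.map (fun c => max c chk)).length (a - 1) = some k := by
        simpa using hk
      have hklB : k < (cA.map (fun c => max c chk)).length := by simpa using hklt
      set g := cA[k] with hg
      have hgA : PySem.List.pyGetD cA (a - 1) 0 = g := pyGetD_of_idx 0 hk hklt
      have hgB : PySem.List.pyGetD (cA.map (fun c => max c chk)) (a - 1) 0 = max g chk := by
        rw [pyGetD_of_idx 0 hkB hklB]; simp [hg]
      have hgcm : g ≤ cm := (h2 _ (List.getElem_mem hklt)).2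
      rw [runEager]
      simp only [solStepA, ha, if_pos, hgA, hgB,
        pySetD_of_idx _ hk, pySetD_of_idx _ hkB]
      have hBset : (cA.map (fun c => max c chk)).set k (max g chk + 1)
          = (cA.set k (max g chk + 1)).map (fun c => max c chk) := by
        rw [List.map_set]
        congr 1
        omega
      rw [hBset]
      refine ih (cA.set k (max g chk + 1)) chk (max cm (max g chk + 1)) h0 (by omega) ?_
        (by simpa using h3) ?_ (fun x hx => hPre x (by simp [hx]))
      · intro c hc
        rcases List.mem_or_eq_of_mem_set hc with h | h
        · have := h2 c h; omega
        · omega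
      · right
        rw [← hBset]
        have hle : (cA.map (fun c => max c chk))[k]! ≤ max g chk + 1 := by
          rw [List.getElem!_eq_getElem?_getD, List.getElem?_eq_getElem hklB, Option.getD_some]
          rw [List.getElem_map]
          omega
        rw [foldr_max_set _ k _ hklB hle]
        rcases hM with hM | hM
        · subst hM; simp at hklt
        · rw [hM]
    · -- max-counter branch
      rw [runEager]
      simp only [solStepA, ha, if_neg, not_false_iff]
      by_cases hcA : cA = []
      · -- cA = [] : N.toNat = 0, everything stays empty
        subst hcA
        have hn0 : N.toNat = 0 := by simpa using h3.symm
        simp only [List.map_nil, hn0, List.replicate_zero]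
        have hcm0 : (0:Int) ≤ cm := by omega
        exact ih [] cm cm hcm0 le_rfl (by simp) (by simp [hn0]) (Or.inl rfl)
          (fun x hx => hPre x (by simp [hx]))
      · have hM' : (cA.map (fun c => max c chk)).foldr max 0 = cm := (hM.resolve_left hcA)
        have hmax : pyMax0 (cA.map (fun c => max c chk)) = cm := by
          rw [pyMax0_eq_foldr _ (by
            intro y hy
            rcases List.mem_map.mp hy with ⟨c, _, rfl⟩
            omega), hM']
        have hrep : List.replicate N.toNat cm = cA.map (fun c => max c cm) := by
          rw [← h3]
          refine (List.eq_replicate_iff.mpr ⟨by simp, ?_⟩).symm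
          intro b hb
          rcases List.mem_map.mp hb with ⟨c, hc, rfl⟩
          have := (h2 c hc).2
          omega
        rw [hmax, hrep]
        refine ih cA cm cm (by omega) le_rfl (fun c hc => ⟨(h2 c hc).1, (h2 c hc).2⟩) h3 ?_
          (fun x hx => hPre x (by simp [hx]))
        right
        apply foldr_max_all_eq _ cm (by simpa using hcA)
        · intro x hx
          rcases List.mem_map.mp hx with ⟨c, hc, rfl⟩
          have := (h2 c hc).2
          omega
        · omega

-- ===== VERDICT (by name: the statement is the Claim_ definition above) =====
theorem solution_spec : Claim_equal_solution := by
  intro N A _ hPre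
  simp only [Spec_solution, solution, solution_alt]
  have h0 : (List.replicate N.toNat (0 : Int)).map (fun c => max c 0)
      = List.replicate N.toNat 0 := by simp
  have hM : List.replicate N.toNat (0:Int) = [] ∨
      ((List.replicate N.toNat (0:Int)).map (fun c => max c 0)).foldr max 0 = 0 := by
    rcases Nat.eq_zero_or_pos N.toNat with hn | hn
    · exact Or.inl (by simp [hn])
    · right
      rw [h0]
      exact foldr_max_all_eq _ 0 (by simp only [ne_eq, List.replicate_eq_nil_iff]; omega)
        (fun x hx => List.eq_of_mem_replicate hx) le_rfl
  have := solution_loop_inv N A (List.replicate N.toNat 0) 0 0 le_rfl le_rfl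
    (by intro c hc; simp [List.eq_of_mem_replicate hc]) (by simp) hM hPre
  rw [h0] at this
  rw [this]
  apply List.map_congr_left
  intro c _
  split_ifs with h2 <;> omega
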